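-- pv_equiv track=rewrite | github.com/4Meter/EEG_SSVEP | MazeGame/maze.py | check_if_at_edge
-- ===== SOURCE A (Python) =====
-- def check_if_at_edge(position, radius, maze_dimensions, tile_size):
--     for dy in range(-radius, radius + 1):
--         for dx in range(-radius, radius + 1):
--             if dx*dx + dy*dy <= radius*radius:
--                 px = (position[0] + dx) // tile_size
--                 py = (position[1] + dy) // tile_size
--                 if px <= 0 or px >= maze_dimensions[1] - 1 or py <= 0 or py >= maze_dimensions[0] - 1:
--                     return True
--     return False
-- ===== SOURCE B (Python) =====
-- def check_if_at_edge(position, radius, maze_dimensions, tile_size):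
--     # O(1): the disc's tile coordinates along each axis span exactly the tiles of
--     # position +/- radius (the full horizontal/vertical chords through the centre),
--     # so only the two extreme floor-divisions per axis need checking.
--     if radius < 0:
--         return False
--     x, y = position[0], position[1]
--     xa = (x - radius) // tile_size
--     xb = (x + radius) // tile_size
--     ya = (y - radius) // tile_size
--     yb = (y + radius) // tile_size
--     return (min(xa, xb) <= 0 or max(xa, xb) >= maze_dimensions[1] - 1
--             or min(ya, yb) <= 0 or max(ya, yb) >= maze_dimensions[0] - 1)
-- ===== Notes on version B (the rewrite author's own statement) =====
-- stated objective: faster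
-- what changed: Replaces the O(radius^2) scan of every lattice point in the disc by an O(1) check of the two extreme floor-divided tile coordinates per axis (the disc's full chords through the centre), since the border test decouples per axis and floor division is monotone in the numerator.
-- outside the precondition, e.g. on check_if_at_edge((40, -42), 0, (0,), -1): A returns True, B returns True
import Mathlib
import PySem

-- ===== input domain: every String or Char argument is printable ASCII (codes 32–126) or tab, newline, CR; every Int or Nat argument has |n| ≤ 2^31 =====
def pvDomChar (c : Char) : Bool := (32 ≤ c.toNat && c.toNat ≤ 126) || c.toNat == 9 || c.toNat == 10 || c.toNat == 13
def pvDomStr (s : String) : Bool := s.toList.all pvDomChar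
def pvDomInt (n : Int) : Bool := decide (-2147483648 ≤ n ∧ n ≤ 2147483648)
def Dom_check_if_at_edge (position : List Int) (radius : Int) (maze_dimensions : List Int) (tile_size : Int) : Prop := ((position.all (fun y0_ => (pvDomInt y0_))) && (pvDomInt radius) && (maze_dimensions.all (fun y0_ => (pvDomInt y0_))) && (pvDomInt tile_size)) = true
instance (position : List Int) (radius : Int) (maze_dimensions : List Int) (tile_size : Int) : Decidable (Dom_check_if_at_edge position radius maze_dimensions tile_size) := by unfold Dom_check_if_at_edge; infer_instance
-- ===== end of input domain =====

-- B replaces A's O(radius^2) scan of the disc by an O(1) test of the extreme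
-- floor-divided tile coordinates per axis (objective: faster, asymptotic).


-- ===== PORT A =====
-- Early 'return True' in a pure double loop = List.any over the two ranges.
def check_if_at_edge (position : List Int) (radius : Int) (maze_dimensions : List Int) (tile_size : Int) : Bool :=
  (PySem.List.pyRange (-radius) (radius + 1) 1).any (fun dy =>
    (PySem.List.pyRange (-radius) (radius + 1) 1).any (fun dx =>
      if dx * dx + dy * dy ≤ radius * radius then
        let px := PySem.Int.floordiv (PySem.List.pyGetD position 0 0 + dx) tile_size
        let py := PySem.Int.floordiv (PySem.List.pyGetD position 1 0 + dy) tile_size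
        decide (px ≤ 0 ∨ px ≥ PySem.List.pyGetD maze_dimensions 1 0 - 1 ∨
                py ≤ 0 ∨ py ≥ PySem.List.pyGetD maze_dimensions 0 0 - 1)
      else false))

-- ===== PORT B =====
def check_if_at_edge_alt (position : List Int) (radius : Int) (maze_dimensions : List Int) (tile_size : Int) : Bool :=
  if radius < 0 then false
  else
    let x := PySem.List.pyGetD position 0 0
    let y := PySem.List.pyGetD position 1 0
    let xa := PySem.Int.floordiv (x - radius) tile_size
    let xb := PySem.Int.floordiv (x + radius) tile_size
    let ya := PySem.Int.floordiv (y - radius) tile_size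
    let yb := PySem.Int.floordiv (y + radius) tile_size
    decide (min xa xb ≤ 0 ∨ max xa xb ≥ PySem.List.pyGetD maze_dimensions 1 0 - 1 ∨
            min ya yb ≤ 0 ∨ max ya yb ≥ PySem.List.pyGetD maze_dimensions 0 0 - 1)

-- ===== PRECONDITION & SPEC =====
-- A returns normally when radius < 0 (empty loop), or when tile_size ≠ 0 (no
-- ZeroDivisionError) and both lists have at least 2 elements (no IndexError).
-- Pre_ also excludes short maze_dimensions lists: whether A returns True or raises
-- IndexError there hangs on 'or' short-circuit evaluation order over the scan, an
-- accident B does not reproduce (B may return True where A raises, or both return True).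
def Pre_check_if_at_edge (position : List Int) (radius : Int) (maze_dimensions : List Int) (tile_size : Int) : Prop :=
  radius < 0 ∨ (tile_size ≠ 0 ∧ 2 ≤ position.length ∧ 2 ≤ maze_dimensions.length)
instance (position : List Int) (radius : Int) (maze_dimensions : List Int) (tile_size : Int) : Decidable (Pre_check_if_at_edge position radius maze_dimensions tile_size) := by unfold Pre_check_if_at_edge; infer_instance
def pvWitness_check_if_at_edge : List Int × Int × List Int × Int := ([7, 9], 2, [5, 6], 3)

def Spec_check_if_at_edge (position : List Int) (radius : Int) (maze_dimensions : List Int) (tile_size : Int) (out : Bool) : Prop := out = check_if_at_edge_alt position radius maze_dimensions tile_size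
instance (position : List Int) (radius : Int) (maze_dimensions : List Int) (tile_size : Int) (out : Bool) : Decidable (Spec_check_if_at_edge position radius maze_dimensions tile_size out) := by unfold Spec_check_if_at_edge; infer_instance

-- ===== CLAIM (what is proved, stated in full; the proofs are below) =====
def Claim_equal_check_if_at_edge : Prop := ∀ (position : List Int) (radius : Int) (maze_dimensions : List Int) (tile_size : Int), Dom_check_if_at_edge position radius maze_dimensions tile_size → Pre_check_if_at_edge position radius maze_dimensions tile_size → Spec_check_if_at_edge position radius maze_dimensions tile_size (check_if_at_edge position radius maze_dimensions tile_size)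

-- ===== LEMMAS AND PROOFS =====

-- floor division is monotone in the numerator for positive divisor
theorem pv_fdiv_mono {a b t : Int} (ht : 0 < t) (hab : a ≤ b) :
    PySem.Int.floordiv a t ≤ PySem.Int.floordiv b t := by
  rw [PySem.Int.floordiv_eq_ediv_of_pos ht, PySem.Int.floordiv_eq_ediv_of_pos ht]
  exact Int.ediv_le_ediv ht hab

-- for any nonzero divisor, floordiv at an interior point is between the endpoint values
theorem pv_fdiv_between {a b c t : Int} (ht : t ≠ 0) (h1 : a ≤ c) (h2 : c ≤ b) :
    min (PySem.Int.floordiv a t) (PySem.Int.floordiv b t) ≤ PySem.Int.floordiv c t ∧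
    PySem.Int.floordiv c t ≤ max (PySem.Int.floordiv a t) (PySem.Int.floordiv b t) := by
  rcases lt_or_gt_of_ne ht with htn | htp
  · have e : ∀ z : Int, PySem.Int.floordiv z t = PySem.Int.floordiv (-z) (-t) := by
      intro z; rw [← PySem.Int.floordiv_neg_neg]
    have h1' := pv_fdiv_mono (t := -t) (by omega) (by omega : -c ≤ -a)
    have h2' := pv_fdiv_mono (t := -t) (by omega) (by omega : -b ≤ -c)
    rw [e a, e b, e c]
    constructor
    · exact le_trans (min_le_right _ _) h2'
    · exact le_trans h1' (le_max_left _ _)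
  · have h1' := pv_fdiv_mono htp h1
    have h2' := pv_fdiv_mono htp h2
    exact ⟨le_trans (min_le_left _ _) h1', le_trans h2' (le_max_right _ _)⟩

-- the whole equivalence over abstract centre/bounds, for r >= 0 and t /= 0
theorem pv_main (x y M N r t : Int) (hr : 0 ≤ r) (ht : t ≠ 0) :
    ((PySem.List.pyRange (-r) (r + 1) 1).any (fun dy =>
      (PySem.List.pyRange (-r) (r + 1) 1).any (fun dx =>
        if dx * dx + dy * dy ≤ r * r then
          decide (PySem.Int.floordiv (x + dx) t ≤ 0 ∨ PySem.Int.floordiv (x + dx) t ≥ M ∨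
                  PySem.Int.floordiv (y + dy) t ≤ 0 ∨ PySem.Int.floordiv (y + dy) t ≥ N)
        else false)))
    = decide (min (PySem.Int.floordiv (x - r) t) (PySem.Int.floordiv (x + r) t) ≤ 0 ∨
              max (PySem.Int.floordiv (x - r) t) (PySem.Int.floordiv (x + r) t) ≥ M ∨
              min (PySem.Int.floordiv (y - r) t) (PySem.Int.floordiv (y + r) t) ≤ 0 ∨
              max (PySem.Int.floordiv (y - r) t) (PySem.Int.floordiv (y + r) t) ≥ N) := by
  rw [Bool.eq_iff_iff, List.any_eq_true, decide_eq_true_eq]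
  constructor
  · rintro ⟨dy, hdy, hinner⟩
    rw [List.any_eq_true] at hinner
    obtain ⟨dx, hdx, hbody⟩ := hinner
    rw [PySem.List.mem_pyRange_one] at hdy hdx
    by_cases hin : dx * dx + dy * dy ≤ r * r
    · rw [if_pos hin, decide_eq_true_eq] at hbody
      have hx1 : x - r ≤ x + dx := by omega
      have hx2 : x + dx ≤ x + r := by omega
      have hy1 : y - r ≤ y + dy := by omega
      have hy2 : y + dy ≤ y + r := by omega
      obtain ⟨hxlo, hxhi⟩ := pv_fdiv_between ht hx1 hx2
      obtain ⟨hylo, hyhi⟩ := pv_fdiv_between ht hy1 hy2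
      rcases hbody with h | h | h | h
      · exact Or.inl (le_trans hxlo h)
      · exact Or.inr (Or.inl (le_trans h hxhi))
      · exact Or.inr (Or.inr (Or.inl (le_trans hylo h)))
      · exact Or.inr (Or.inr (Or.inr (le_trans h hyhi)))
    · rw [if_neg hin] at hbody; exact absurd hbody (by simp)
  · -- witness: an extreme point on a chord through the centre (other offset 0)
    have hsq : ∀ d : Int, -r ≤ d → d ≤ r → d * d + 0 ≤ r * r := by
      intro d h1 h2; nlinarith
    have mem : ∀ d : Int, -r ≤ d → d ≤ r → d ∈ PySem.List.pyRange (-r) (r + 1) 1 := by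
      intro d h1 h2; exact PySem.List.mem_pyRange_one.mpr ⟨h1, by omega⟩
    have give : ∀ dy dx : Int, -r ≤ dy → dy ≤ r → -r ≤ dx → dx ≤ r →
        (dx * dx + dy * dy ≤ r * r) →
        (PySem.Int.floordiv (x + dx) t ≤ 0 ∨ PySem.Int.floordiv (x + dx) t ≥ M ∨
         PySem.Int.floordiv (y + dy) t ≤ 0 ∨ PySem.Int.floordiv (y + dy) t ≥ N) →
        ∃ dy' ∈ PySem.List.pyRange (-r) (r + 1) 1,
          ((PySem.List.pyRange (-r) (r + 1) 1).any (fun dx' =>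
            if dx' * dx' + dy' * dy' ≤ r * r then
              decide (PySem.Int.floordiv (x + dx') t ≤ 0 ∨ PySem.Int.floordiv (x + dx') t ≥ M ∨
                      PySem.Int.floordiv (y + dy') t ≤ 0 ∨ PySem.Int.floordiv (y + dy') t ≥ N)
            else false)) = true := by
      intro dy dx h1 h2 h3 h4 hin hcond
      refine ⟨dy, mem dy h1 h2, ?_⟩
      rw [List.any_eq_true]
      exact ⟨dx, mem dx h3 h4, by rw [if_pos hin, decide_eq_true_eq]; exact hcond⟩
    intro h
    rcases h with h | h | h | h
    · rcases min_cases (PySem.Int.floordiv (x - r) t) (PySem.Int.floordiv (x + r) t) with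
        ⟨he, _⟩ | ⟨he, _⟩ <;> rw [he] at h
      · exact give 0 (-r) (by omega) hr (by omega) (by omega)
          (by have := hsq (-r) (by omega) (by omega); nlinarith)
          (Or.inl (by rw [show x + -r = x - r by ring]; exact h))
      · exact give 0 r (by omega) hr (by omega) (le_refl r)
          (by have := hsq r (by omega) (le_refl r); nlinarith) (Or.inl h)
    · rcases max_cases (PySem.Int.floordiv (x - r) t) (PySem.Int.floordiv (x + r) t) with
        ⟨he, _⟩ | ⟨he, _⟩ <;> rw [he] at h
      · exact give 0 (-r) (by omega) hr (by omega) (by omega)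
          (by have := hsq (-r) (by omega) (by omega); nlinarith)
          (Or.inr (Or.inl (by rw [show x + -r = x - r by ring]; exact h)))
      · exact give 0 r (by omega) hr (by omega) (le_refl r)
          (by have := hsq r (by omega) (le_refl r); nlinarith) (Or.inr (Or.inl h))
    · rcases min_cases (PySem.Int.floordiv (y - r) t) (PySem.Int.floordiv (y + r) t) with
        ⟨he, _⟩ | ⟨he, _⟩ <;> rw [he] at h
      · exact give (-r) 0 (by omega) (by omega) (by omega) hr
          (by have := hsq (-r) (by omega) (by omega); nlinarith)
          (Or.inr (Or.inr (Or.inl (by rw [show y + -r = y - r by ring]; exact h))))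
      · exact give r 0 (by omega) (le_refl r) (by omega) hr
          (by have := hsq r (by omega) (le_refl r); nlinarith)
          (Or.inr (Or.inr (Or.inl h)))
    · rcases max_cases (PySem.Int.floordiv (y - r) t) (PySem.Int.floordiv (y + r) t) with
        ⟨he, _⟩ | ⟨he, _⟩ <;> rw [he] at h
      · exact give (-r) 0 (by omega) (by omega) (by omega) hr
          (by have := hsq (-r) (by omega) (by omega); nlinarith)
          (Or.inr (Or.inr (Or.inr (by rw [show y + -r = y - r by ring]; exact h))))
      · exact give r 0 (by omega) (le_refl r) (by omega) hr
          (by have := hsq r (by omega) (le_refl r); nlinarith)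
          (Or.inr (Or.inr (Or.inr h)))

theorem check_if_at_edge_spec : Claim_equal_check_if_at_edge := by
  intro position radius maze_dimensions tile_size _hdom hpre
  unfold Spec_check_if_at_edge check_if_at_edge check_if_at_edge_alt
  by_cases hr : radius < 0
  · rw [PySem.List.pyRange_one_eq_nil (by omega), if_pos hr]
    simp
  · have ht : tile_size ≠ 0 := by
      rcases hpre with h | h
      · omega
      · exact h.1
    rw [if_neg hr]
    exact pv_main (PySem.List.pyGetD position 0 0) (PySem.List.pyGetD position 1 0)
      (PySem.List.pyGetD maze_dimensions 1 0 - 1) (PySem.List.pyGetD maze_dimensions 0 0 - 1)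
      radius tile_size (by omega) ht
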